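-- pv_equiv track=rewrite | github.com/papibe/flipflop-2025 | python/day02/part3.py | solve
-- ===== SOURCE A (Python) =====
-- from typing import Dict
--
-- UP: str = "^"
--
-- DOWN: str = "v"
--
-- memo: Dict[int, int] = {}
--
-- def fibonacci(n: int) -> int:
--     if n <= 1:
--         return n
--     if n in memo:
--         return memo[n]
--
--     memo[n] = fibonacci(n - 1) + fibonacci(n - 2)
--
--     return memo[n]
--
-- def solve(data: str) -> int:
--     height: int = 0
--     max_height: int = 0
--
--     index: int = 0
--     while index < len(data):
--         j: int = index
--         n: int = 0
--         while j < len(data) and data[j] == data[index]: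
--             j += 1
--             n += 1
--
--         if data[index] == UP:
--             height += fibonacci(n)
--
--         elif data[index] == DOWN:
--             height -= fibonacci(n)
--
--         max_height = max(max_height, height)
--         index = j
--
--     return max_height
-- ===== SOURCE B (Python) =====
-- from itertools import groupby
--
-- UP: str = "^"
--
-- DOWN: str = "v"
--
--
-- def fibonacci(n: int) -> int:
--     a, b = 0, 1
--     for _ in range(n):
--         a, b = b, a + b
--     return a
--
--
-- def solve(data: str) -> int:
--     height = 0
--     max_height = 0
--     for ch, group in groupby(data):
--         step = fibonacci(len(list(group)))
--         if ch == UP: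
--             height += step
--         elif ch == DOWN:
--             height -= step
--         if height > max_height:
--             max_height = height
--     return max_height
-- ===== Notes on version B (the rewrite author's own statement) =====
-- stated objective: idiomatic
-- what changed: B replaces A's manual two-pointer run scanning with itertools.groupby over maximal runs and replaces the memoized recursive fibonacci (with a module-level cache dict) with an iterative pair-update fibonacci.
import Mathlib
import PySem

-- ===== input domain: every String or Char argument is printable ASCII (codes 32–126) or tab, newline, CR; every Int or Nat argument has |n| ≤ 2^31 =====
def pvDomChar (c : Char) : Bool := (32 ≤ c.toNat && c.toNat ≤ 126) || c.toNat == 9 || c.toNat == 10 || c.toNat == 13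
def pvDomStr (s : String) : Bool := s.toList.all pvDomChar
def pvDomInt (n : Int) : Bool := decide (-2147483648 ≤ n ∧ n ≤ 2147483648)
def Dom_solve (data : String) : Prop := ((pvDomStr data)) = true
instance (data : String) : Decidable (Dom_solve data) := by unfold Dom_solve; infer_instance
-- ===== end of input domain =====

-- B replaces A's manual index scanning with a groupby-over-runs fold and A's memoized
-- recursive fibonacci with an iterative pair-update fibonacci; equal for every input.

-- ===== PORT A =====
-- A's memoized fibonacci: the module-level cache dict is threaded explicitly; the fuel
-- argument only makes the recursion structural (n decreases by ≥ 1 each level).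
def fibMemoA (fuel : Nat) (memo : PySem.Dict Int Int) (n : Int) :
    Int × PySem.Dict Int Int :=
  match fuel with
  | 0 => (0, memo)  -- never reached when fuel > n
  | fuel + 1 =>
    if n ≤ 1 then (n, memo)
    else
      match memo.get? n with
      | some v => (v, memo)
      | none =>
        let p1 := fibMemoA fuel memo (n - 1)
        let p2 := fibMemoA fuel p1.2 (n - 2)
        (p1.1 + p2.1, p2.2.insert n (p1.1 + p2.1))

-- A's inner while loop: count of leading characters of the suffix equal to data[index]
def runLenA (c : Char) : List Char → Nat
  | [] => 0
  | x :: xs => if x == c then runLenA c xs + 1 else 0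

lemma runLenA_cons_self (c : Char) (xs : List Char) :
    runLenA c (c :: xs) = runLenA c xs + 1 := by simp [runLenA]

-- A's outer while loop over the remaining suffix of the string
def solveLoopA (l : List Char) (height maxHeight : Int)
    (memo : PySem.Dict Int Int) : Int :=
  match l with
  | [] => maxHeight
  | c :: t =>
    let n : Nat := runLenA c (c :: t)
    if c == '^' then
      let fr := fibMemoA (n + 1) memo (n : Int)
      let h' := height + fr.1
      solveLoopA ((c :: t).drop n) h' (max maxHeight h') fr.2
    else if c == 'v' then
      let fr := fibMemoA (n + 1) memo (n : Int)
      let h' := height - fr.1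
      solveLoopA ((c :: t).drop n) h' (max maxHeight h') fr.2
    else
      solveLoopA ((c :: t).drop n) height (max maxHeight height) memo
  termination_by l.length
  decreasing_by
    all_goals
      have h1 : 1 ≤ runLenA c (c :: t) := by rw [runLenA_cons_self]; omega
      simp only [List.length_drop, List.length_cons]
      omega

def solve (data : String) : Int := solveLoopA data.toList 0 0 PySem.Dict.empty

-- ===== PORT B =====
-- B's iterative fibonacci: a, b = 0, 1; for _ in range(n): a, b = b, a + b
def fibIterB (n : Nat) : Int :=
  ((List.range n).foldl (fun p _ => (p.2, p.1 + p.2)) ((0 : Int), (1 : Int))).1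

-- B's loop over itertools.groupby(data): splitBy (· == ·) yields the maximal runs
def solve_alt (data : String) : Int :=
  ((data.toList.splitBy (· == ·)).foldl
    (fun (s : Int × Int) g =>
      match g with
      | [] => s  -- groupby never yields an empty group
      | ch :: _ =>
        let step := fibIterB g.length
        let h := if ch == '^' then s.1 + step
                 else if ch == 'v' then s.1 - step
                 else s.1
        (h, if h > s.2 then h else s.2))
    ((0 : Int), (0 : Int))).2

-- ===== PRECONDITION & SPEC =====
def Spec_solve (data : String) (out : Int) : Prop := out = solve_alt data
instance (data : String) (out : Int) : Decidable (Spec_solve data out) := by unfold Spec_solve; infer_instance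

-- ===== CLAIM (what is proved, stated in full; the proofs are below) =====
def Claim_equal_solve : Prop := ∀ (data : String), Dom_solve data → Spec_solve data (solve data)

-- ===== LEMMAS AND PROOFS =====

-- mathematical Fibonacci used as the common specification of both fib helpers
def fibN : Nat → Int
  | 0 => 0
  | 1 => 1
  | n + 2 => fibN (n + 1) + fibN n

-- value A's fibonacci returns on an arbitrary Int argument
def fibSpecI (n : Int) : Int := if n ≤ 1 then n else fibN n.toNat

def GoodMemo (m : PySem.Dict Int Int) : Prop :=
  ∀ k v, m.get? k = some v → v = fibSpecI k

lemma fibSpecI_natCast (n : Nat) : fibSpecI (n : Nat) = fibN n := by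
  match n with
  | 0 => simp [fibSpecI, fibN]
  | 1 => simp [fibSpecI, fibN]
  | n + 2 =>
    have h1 : ¬ ((n + 2 : Nat) : Int) ≤ 1 := by push_cast; omega
    rw [fibSpecI, if_neg h1, Int.toNat_natCast]

lemma fibSpecI_step (n : Int) (h : ¬ n ≤ 1) :
    fibSpecI (n - 1) + fibSpecI (n - 2) = fibSpecI n := by
  obtain ⟨m, rfl⟩ : ∃ m : Nat, n = (m : Int) := ⟨n.toNat, by omega⟩
  obtain ⟨k, rfl⟩ : ∃ k, m = k + 2 := ⟨m - 2, by omega⟩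
  have e1 : ((k + 2 : Nat) : Int) - 1 = ((k + 1 : Nat) : Int) := by push_cast; ring
  have e2 : ((k + 2 : Nat) : Int) - 2 = ((k : Nat) : Int) := by push_cast; ring
  rw [e1, e2, fibSpecI_natCast, fibSpecI_natCast, fibSpecI_natCast]
  rfl

lemma fibMemoA_correct (fuel : Nat) (n : Int) (m : PySem.Dict Int Int)
    (hm : GoodMemo m) (hf : n.toNat < fuel) :
    (fibMemoA fuel m n).1 = fibSpecI n ∧ GoodMemo (fibMemoA fuel m n).2 := by
  induction fuel generalizing n m with
  | zero => omega
  | succ fuel ih =>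
    by_cases hn : n ≤ 1
    · simp only [fibMemoA, if_pos hn]
      exact ⟨by simp [fibSpecI, hn], hm⟩
    · simp only [fibMemoA, if_neg hn]
      cases hget : m.get? n with
      | some v => exact ⟨(hm n v hget).symm ▸ rfl, hm⟩
      | none =>
        have h1 := ih (n - 1) m hm (by omega)
        have h2 := ih (n - 2) (fibMemoA fuel m (n - 1)).2 h1.2 (by omega)
        refine ⟨?_, ?_⟩
        · simp only []
          rw [h1.1, h2.1, fibSpecI_step n hn]
        · intro k v hv
          simp only [] at hv
          rw [PySem.Dict.get?_insert] at hv
          split at hv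
          · next heq =>
            cases hv
            rw [heq, ← fibSpecI_step n hn, h1.1, h2.1]
          · exact h2.2 k v hv

lemma fibIter_pair (n : Nat) :
    (List.range n).foldl (fun p _ => (p.2, p.1 + p.2)) ((0 : Int), (1 : Int)) =
      (fibN n, fibN (n + 1)) := by
  induction n with
  | zero => simp [fibN]
  | succ n ih =>
    rw [List.range_succ, List.foldl_append, ih]
    simp [fibN, Int.add_comm]

lemma fibIterB_eq (n : Nat) : fibIterB n = fibN n := by
  unfold fibIterB; rw [fibIter_pair]

lemma runLenA_eq (c : Char) (l : List Char) :
    runLenA c l = (l.takeWhile (c == ·)).length := by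
  induction l with
  | nil => simp [runLenA]
  | cons x xs ih =>
    by_cases h : x = c
    · subst h; simp [runLenA, ih]
    · have h1 : (x == c) = false := by simp [h]
      have h2 : (c == x) = false := by simp [Ne.symm h]
      simp [runLenA, h1, h2]

lemma splitBy_loop_eq (l : List Char) (b : Char) (r : List Char)
    (acc : List (List Char)) :
    List.splitBy.loop (· == ·) l b r acc =
      acc.reverse ++ ((b :: r).reverse ++ l.takeWhile (b == ·)) ::
        List.splitBy (· == ·) (l.dropWhile (b == ·)) := by
  induction l generalizing b r acc with
  | nil => simp [List.splitBy.loop]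
  | cons a as ih =>
    cases hb : (b == a) with
    | true =>
      obtain rfl : b = a := eq_of_beq hb
      rw [List.splitBy.loop, hb, ih]
      simp
    | false =>
      rw [List.splitBy.loop, hb, ih, ih]
      have hsb : List.splitBy (· == ·) (a :: as) =
          List.splitBy.loop (· == ·) as a [] [] := rfl
      simp only [List.takeWhile_cons, List.dropWhile_cons, hb,
        Bool.false_eq_true, if_false]
      rw [hsb, ih]
      simp

lemma splitBy_cons (a : Char) (l : List Char) :
    List.splitBy (· == ·) (a :: l) =
      (a :: l.takeWhile (a == ·)) ::
        List.splitBy (· == ·) (l.dropWhile (a == ·)) := by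
  have : List.splitBy (· == ·) (a :: l) = List.splitBy.loop (· == ·) l a [] [] := rfl
  rw [this, splitBy_loop_eq]
  simp

lemma drop_takeWhile_len (p : Char → Bool) (l : List Char) :
    l.drop (l.takeWhile p).length = l.dropWhile p := by
  induction l with
  | nil => rfl
  | cons a as ih =>
    by_cases h : p a
    · simp [h, ih]
    · simp [h]

lemma main_loop (k : Nat) (l : List Char) (hk : l.length ≤ k)
    (h mh : Int) (m : PySem.Dict Int Int) (hm : GoodMemo m) :
    solveLoopA l h mh m =
      ((List.splitBy (· == ·) l).foldl
        (fun (s : Int × Int) g =>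
          match g with
          | [] => s
          | ch :: _ =>
            let step := fibIterB g.length
            let hh := if ch == '^' then s.1 + step
                     else if ch == 'v' then s.1 - step
                     else s.1
            (hh, if hh > s.2 then hh else s.2))
        (h, mh)).2 := by
  induction k generalizing l h mh m with
  | zero =>
    have : l = [] := List.eq_nil_of_length_eq_zero (by omega)
    subst this
    simp [solveLoopA, List.splitBy_nil]
  | succ k ih =>
    cases l with
    | nil => simp [solveLoopA, List.splitBy_nil]
    | cons c t =>
      have hrun : runLenA c (c :: t) = (t.takeWhile (c == ·)).length + 1 := by
        rw [runLenA_cons_self, runLenA_eq]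
      have hdrop : (c :: t).drop (runLenA c (c :: t)) = t.dropWhile (c == ·) := by
        rw [hrun]; simp only [List.drop_succ_cons]; exact drop_takeWhile_len _ _
      have hlen : (t.dropWhile (c == ·)).length ≤ k := by
        have := List.length_dropWhile_le (c == ·) t
        simp at hk; omega
      have hfib : ∀ m' : PySem.Dict Int Int, GoodMemo m' →
          (fibMemoA (runLenA c (c :: t) + 1) m' ((runLenA c (c :: t) : Nat) : Int)).1 =
            fibIterB ((t.takeWhile (c == ·)).length + 1) ∧
          GoodMemo (fibMemoA (runLenA c (c :: t) + 1) m' ((runLenA c (c :: t) : Nat) : Int)).2 := by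
        intro m' hm'
        have hc := fibMemoA_correct (runLenA c (c :: t) + 1) ((runLenA c (c :: t) : Nat) : Int) m' hm' (by omega)
        refine ⟨?_, hc.2⟩
        rw [hc.1, fibSpecI_natCast, fibIterB_eq, hrun]
      rw [splitBy_cons]
      simp only [List.foldl_cons]
      have hglen : (c :: t.takeWhile (c == ·)).length = (t.takeWhile (c == ·)).length + 1 := by
        simp
      by_cases hup : c = '^'
      · subst hup
        have hcv : (('^' : Char) == 'v') = false := by decide
        simp only [solveLoopA, beq_self_eq_true, if_true, hglen, hdrop]
        obtain ⟨hf1, hf2⟩ := hfib m hm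
        rw [hf1]
        rw [ih _ hlen _ _ _ hf2]
        congr 2
        by_cases hle : (h + fibIterB ((t.takeWhile (fun x => '^' == x)).length + 1)) ≤ mh
        · rw [max_eq_left hle, if_neg (by omega)]
        · rw [max_eq_right (by omega), if_pos (by omega)]
      · by_cases hdn : c = 'v'
        · subst hdn
          have hcv : (('v' : Char) == '^') = false := by decide
          simp only [solveLoopA, hcv, beq_self_eq_true, Bool.false_eq_true, if_true, if_false, hglen, hdrop]
          obtain ⟨hf1, hf2⟩ := hfib m hm
          rw [hf1]
          rw [ih _ hlen _ _ _ hf2]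
          congr 2
          by_cases hle : (h - fibIterB ((t.takeWhile (fun x => 'v' == x)).length + 1)) ≤ mh
          · rw [max_eq_left hle, if_neg (by omega)]
          · rw [max_eq_right (by omega), if_pos (by omega)]
        · have h1 : (c == '^') = false := by simp [hup]
          have h2 : (c == 'v') = false := by simp [hdn]
          simp only [solveLoopA, h1, h2, Bool.false_eq_true, if_false, hglen, hdrop]
          rw [ih _ hlen _ _ _ hm]
          congr 2
          by_cases hle : h ≤ mh
          · rw [max_eq_left hle, if_neg (by omega)]
          · rw [max_eq_right (by omega), if_pos (by omega)]

-- ===== VERDICT (by name: the statement is the Claim_ definition above) =====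
theorem solve_spec : Claim_equal_solve := by
  intro data _
  unfold Spec_solve solve solve_alt
  exact main_loop data.toList.length data.toList le_rfl 0 0 PySem.Dict.empty
    (by intro k v hv; simp [PySem.Dict.get?_empty] at hv)
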